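-- pv_equiv track=rewrite | github.com/julianzuo526/pathfuzz | distance/path_constrain.py | compute_instrumentation_set
-- ===== SOURCE A (Python) =====
-- from collections import defaultdict, deque
--
-- def get_call_path(call_graph, start, target):
--     path = []
--     visited = set()
--
--     def dfs(node, current_path):
--         if node in visited:
--             return False
--         visited.add(node)
--         current_path.append(node)
--         if node == target:
--             path.extend(current_path)
--             return True
--         for callee in call_graph.get(node, []):
--             if dfs(callee, current_path):
--                 return True
--         current_path.pop()
--         return False
--
--     dfs(start, [])
--     return path
--
-- def get_preceding_dependent_funcs(call_sites, target_func):
--     dependent_funcs = set()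
--     for caller, callee_infos in call_sites.items():
--         target_lines = [line for callee, line in callee_infos if callee == target_func]
--         if not target_lines:
--             continue
--         for callee, line in callee_infos:
--             if any(line < tgt_line for tgt_line in target_lines) and callee != target_func:
--                 dependent_funcs.add(callee)
--     return dependent_funcs
--
-- def get_recursive_dependencies(call_graph, initial_funcs):
--     all_deps = set(initial_funcs)
--     queue = deque(initial_funcs)
--     while queue:
--         func = queue.popleft()
--         for callee in call_graph.get(func, []):
--             if callee not in all_deps:
--                 all_deps.add(callee)
--                 queue.append(callee)
--     return all_deps
--
-- def expand_by_internal_calls(func_list, bb_calls):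
--     expanded = set(func_list)
--     queue = deque(func_list)
--     while queue:
--         func = queue.popleft()
--         for bb in bb_calls.get(func, []):
--             for callee in bb:
--                 if callee not in expanded:
--                     expanded.add(callee)
--                     queue.append(callee)
--     return expanded
--
-- def compute_instrumentation_set(call_graph, call_sites, bb_calls, entry_func, target_funcs):
--     instrumentation_funcs = set()
--     for target_func in target_funcs:
--         forward_path = get_call_path(call_graph, entry_func, target_func)
--         direct_deps = get_preceding_dependent_funcs(call_sites, target_func)
--         recursive_deps = get_recursive_dependencies(call_graph, direct_deps)
--         bb_expanded = expand_by_internal_calls(recursive_deps, bb_calls)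
--         combined = set(forward_path) | recursive_deps | bb_expanded
--         instrumentation_funcs.update(combined)
--     return instrumentation_funcs
-- ===== SOURCE B (Python) =====
-- def _find_path_iter(call_graph, entry, target):
--     # iterative DFS with an explicit stack of pending-children frames
--     visited = set()
--     path = []
--     pending = [[entry]]
--     while pending:
--         top = pending[-1]
--         if not top:
--             pending.pop()
--             if path:
--                 path.pop()
--             continue
--         node = top.pop(0)
--         if node in visited:
--             continue
--         visited.add(node)
--         path.append(node)
--         if node == target:
--             return path
--         pending.append(list(call_graph.get(node, [])))
--     return []
--
--
-- def _closure(neigh, init):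
--     # pointer-based worklist closure; dedups its init itself
--     order = []
--     seen = set()
--     def push(x):
--         if x not in seen:
--             seen.add(x)
--             order.append(x)
--     for x in init:
--         push(x)
--     i = 0
--     while i < len(order):
--         for c in neigh(order[i]):
--             push(c)
--         i += 1
--     return order
--
--
-- def compute_instrumentation_set(call_graph, call_sites, bb_calls, entry_func, target_funcs):
--     # hoisted per-caller index: each callee's maximal call line, built once
--     idx = []
--     for caller, infos in call_sites.items():
--         d = {}
--         for callee, line in infos:
--             if callee not in d or line > d[callee]:
--                 d[callee] = line
--         idx.append((infos, d))
--     out = []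
--     seen = set()
--     for t in target_funcs:
--         path = _find_path_iter(call_graph, entry_func, t)
--         deps = [callee
--                 for infos, d in idx if t in d
--                 for callee, line in infos if line < d[t] and callee != t]
--         rd = _closure(lambda f: call_graph.get(f, []), deps)
--         full = _closure(lambda f: [c for bb in bb_calls.get(f, []) for c in bb], rd)
--         for x in path + full:
--             if x not in seen:
--                 seen.add(x)
--                 out.append(x)
--     return set(out)
-- ===== Notes on version B (the rewrite author's own statement) =====
-- stated objective: faster
-- what changed: B hoists a per-caller max-call-line index out of the target loop so A's per-target quadratic any(line < tgt_line) rescan of every call site becomes one dict lookup plus a linear filter, replaces A's recursive path dfs by an iterative explicit-stack machine, replaces A's two deque-plus-set BFS closures by one generic pointer-based worklist closure that dedups its own seed, and fuses A's four per-target set unions into a single ordered emit pass.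
import Mathlib
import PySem

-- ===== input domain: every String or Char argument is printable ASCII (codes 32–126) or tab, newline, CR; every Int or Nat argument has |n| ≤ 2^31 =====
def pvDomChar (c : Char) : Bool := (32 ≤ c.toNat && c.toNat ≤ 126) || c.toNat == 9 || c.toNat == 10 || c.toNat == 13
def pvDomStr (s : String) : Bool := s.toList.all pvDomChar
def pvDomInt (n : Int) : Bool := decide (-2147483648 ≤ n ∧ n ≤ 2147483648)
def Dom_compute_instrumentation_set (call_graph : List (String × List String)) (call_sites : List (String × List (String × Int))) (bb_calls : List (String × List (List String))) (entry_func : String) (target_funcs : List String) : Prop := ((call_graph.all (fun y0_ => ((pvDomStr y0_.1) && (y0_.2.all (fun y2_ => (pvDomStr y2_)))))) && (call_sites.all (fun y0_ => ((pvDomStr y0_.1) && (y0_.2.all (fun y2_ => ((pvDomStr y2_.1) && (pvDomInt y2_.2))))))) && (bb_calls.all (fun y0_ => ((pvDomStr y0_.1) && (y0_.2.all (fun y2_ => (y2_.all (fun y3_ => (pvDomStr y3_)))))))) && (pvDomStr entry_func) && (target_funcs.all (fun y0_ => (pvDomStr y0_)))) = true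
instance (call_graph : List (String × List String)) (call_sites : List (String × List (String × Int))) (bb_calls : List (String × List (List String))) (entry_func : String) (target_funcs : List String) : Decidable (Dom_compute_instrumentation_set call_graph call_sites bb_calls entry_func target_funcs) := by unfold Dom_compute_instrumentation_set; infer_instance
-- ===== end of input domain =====

-- ===== PORT A =====
-- B hoists a per-caller max-call-line index out of the target loop (A rescans every call
-- site per target), replaces A's recursive path dfs by an iterative explicit-stack machine,
-- uses one generic pointer-based worklist closure for both of A's deque BFS closures, and
-- fuses A's per-target set unions into a single ordered emit pass (objective: faster).

-- shared size helpers (fuel bounds for the worklist recursions of both ports)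
def pvCgSize (cg : List (String × List String)) : Nat :=
  cg.foldl (fun a p => a + p.2.length) 0
def pvBbSize (bb : List (String × List (List String))) : Nat :=
  bb.foldl (fun a p => a + p.2.foldl (fun b l => b + l.length) 0) 0

-- A: get_call_path's recursive dfs (visited, current_path, path as in the Python; fuel bounds the depth)
mutual
def pvDfsA (cgd : PySem.Dict String (List String)) (target : String) :
    Nat → PySem.Set String → String → List String →
    Bool × PySem.Set String × List String × List String
  | 0, visited, _, cp => (false, visited, cp, [])
  | fuel+1, visited, node, cp =>
    if PySem.Set.contains visited node then (false, visited, cp, [])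
    else
      let visited' := PySem.Set.add visited node
      let cp' := cp ++ [node]
      if node == target then (true, visited', cp', cp')
      else
        match pvDfsLoopA cgd target fuel visited' (cgd.getD node []) cp' with
        | (true, v, c, p) => (true, v, c, p)
        | (false, v, c, _) => (false, v, c.dropLast, [])
termination_by fuel _ _ _ => (fuel, 0)
def pvDfsLoopA (cgd : PySem.Dict String (List String)) (target : String) :
    Nat → PySem.Set String → List String → List String →
    Bool × PySem.Set String × List String × List String
  | _, visited, [], cp => (false, visited, cp, [])
  | fuel, visited, c :: rest, cp =>
    match pvDfsA cgd target fuel visited c cp with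
    | (true, v, cp', p) => (true, v, cp', p)
    | (false, v, cp', _) => pvDfsLoopA cgd target fuel v rest cp'
termination_by fuel _ cs _ => (fuel, cs.length + 1)
end

-- A: get_preceding_dependent_funcs
def pvDepsA (call_sites : List (String × List (String × Int))) (t : String) : PySem.Set String :=
  call_sites.foldl (fun dep p =>
    let tls := (p.2.filter (fun ci => ci.1 == t)).map (fun ci => ci.2)
    if tls.isEmpty then dep
    else p.2.foldl (fun dep ci =>
      if (tls.any (fun tl => decide (ci.2 < tl))) && (ci.1 != t) then PySem.Set.add dep ci.1
      else dep) dep)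
    PySem.Set.empty

-- A: get_recursive_dependencies (BFS with deque; fuel bounds the number of pops)
def pvRecDepsA (cgd : PySem.Dict String (List String)) :
    Nat → PySem.Set String → List String → PySem.Set String
  | 0, all, _ => all
  | _+1, all, [] => all
  | fuel+1, all, func :: qs =>
    let st := (cgd.getD func []).foldl
      (fun (p : PySem.Set String × List String) c =>
        if PySem.Set.contains p.1 c then p else (PySem.Set.add p.1 c, p.2 ++ [c]))
      (all, qs)
    pvRecDepsA cgd fuel st.1 st.2

-- A: expand_by_internal_calls (BFS with deque over the bb lists)
def pvExpandA (bbd : PySem.Dict String (List (List String))) :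
    Nat → PySem.Set String → List String → PySem.Set String
  | 0, exp, _ => exp
  | _+1, exp, [] => exp
  | fuel+1, exp, func :: qs =>
    let st := (bbd.getD func []).foldl
      (fun (p : PySem.Set String × List String) bb =>
        bb.foldl (fun (p : PySem.Set String × List String) c =>
          if PySem.Set.contains p.1 c then p else (PySem.Set.add p.1 c, p.2 ++ [c])) p)
      (exp, qs)
    pvExpandA bbd fuel st.1 st.2

def compute_instrumentation_set (call_graph : List (String × List String)) (call_sites : List (String × List (String × Int))) (bb_calls : List (String × List (List String))) (entry_func : String) (target_funcs : List String) : List String :=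
  let cgd := PySem.Dict.mk call_graph
  let bbd := PySem.Dict.mk bb_calls
  target_funcs.foldl (fun inst t =>
    let fp := (pvDfsA cgd t (pvCgSize call_graph + 2) PySem.Set.empty entry_func []).2.2.2
    let dd := pvDepsA call_sites t
    let rd := pvRecDepsA cgd (dd.length + pvCgSize call_graph + 1) (PySem.Set.ofList dd) dd
    let bb := pvExpandA bbd (rd.length + pvBbSize bb_calls + 1) (PySem.Set.ofList rd) rd
    PySem.Set.update inst (PySem.Set.union (PySem.Set.union (PySem.Set.ofList fp) rd) bb))
    PySem.Set.empty

-- ===== PORT B =====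
-- termination-measure helpers for the stack machine (cited by pvMach's decreasing_by only)
def pvDSize (d : PySem.Dict String (List String)) : Nat :=
  d.values.foldl (fun a l => a + l.length) 0

theorem pvFoldl_len_mono (M : List (List String)) :
    ∀ x y : Nat, x ≤ y →
      M.foldl (fun a l => a + l.length) x ≤ M.foldl (fun a l => a + l.length) y := by
  induction M with
  | nil => intro x y h; simpa using h
  | cons v M ihm =>
    intro x y h
    simp only [List.foldl_cons]
    exact ihm _ _ (by omega)

theorem pvFoldl_len_ge (L : List (List String)) :
    ∀ a : Nat, a ≤ L.foldl (fun a l => a + l.length) a := by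
  induction L with
  | nil => intro a; simp
  | cons u L ih =>
    intro a
    simp only [List.foldl_cons]
    calc a ≤ a + u.length := Nat.le_add_right _ _
      _ ≤ _ := ih (a + u.length)

theorem pvMem_len_le (L : List (List String)) (v : List String) (hv : v ∈ L) :
    v.length ≤ L.foldl (fun a l => a + l.length) 0 := by
  induction L with
  | nil => cases hv
  | cons u L ih =>
    simp only [List.foldl_cons, Nat.zero_add]
    rcases List.mem_cons.1 hv with h | h
    · subst h
      have := pvFoldl_len_ge L v.length
      simpa using this
    · have h1 := ih h
      have h2 := pvFoldl_len_mono L 0 u.length (Nat.zero_le _)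
      omega

theorem pvGetD_len_le (cgd : PySem.Dict String (List String)) (node : String) :
    (cgd.getD node []).length ≤ pvDSize cgd := by
  rcases hg : cgd.get? node with _ | v
  · rw [PySem.Dict.getD_of_get?_eq_none cgd [] hg]
    simp
  · rw [PySem.Dict.getD_of_get?_eq_some cgd [] hg]
    have hm : (node, v) ∈ cgd.items := PySem.Dict.mem_items_of_get?_eq_some cgd hg
    have hv : v ∈ cgd.values := by
      simp only [PySem.Dict.values]
      exact List.mem_map.2 ⟨(node, v), hm, rfl⟩
    exact pvMem_len_le _ _ hv

-- potential of a frame stack: frame at depth-budget d weighs (size+1)·B^d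
def pvPhi (B : Nat) : Nat → List (List String) → Nat
  | _, [] => 0
  | d, f :: r => (f.length + 1) * B ^ d + pvPhi B (d+1) r

theorem pvPhi_pop (B d : Nat) (r : List (List String)) (hB : 0 < B) :
    pvPhi B (d+1) r < pvPhi B d ([] :: r) := by
  have hp : 0 < B ^ d := Nat.pow_pos hB
  simp only [pvPhi, List.length_nil]
  omega

theorem pvPhi_skip (B d : Nat) (n : String) (sib : List String) (r : List (List String))
    (hB : 0 < B) : pvPhi B d (sib :: r) < pvPhi B d ((n :: sib) :: r) := by
  have hp : 0 < B ^ d := Nat.pow_pos hB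
  simp only [pvPhi, List.length_cons]
  have h : (sib.length + 1 + 1) * B ^ d = (sib.length + 1) * B ^ d + B ^ d := by ring
  omega

theorem pvPhi_visit (B e : Nat) (n : String) (ch sib : List String) (r : List (List String))
    (hch : ch.length + 1 < B) :
    pvPhi B e (ch :: sib :: r) < pvPhi B (e + 1) ((n :: sib) :: r) := by
  simp only [pvPhi, List.length_cons]
  have hp : 0 < B ^ e := Nat.pow_pos (by omega)
  have h1 : (ch.length + 1) * B ^ e < B * B ^ e :=
    (Nat.mul_lt_mul_right hp).2 hch
  have h2 : B ^ (e + 1) = B * B ^ e := by rw [pow_succ]; ring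
  have h3 : (sib.length + 1 + 1) * B ^ (e + 1) = (sib.length + 1) * B ^ (e + 1) + B ^ (e + 1) := by
    ring
  omega

-- B: iterative explicit-stack DFS (_find_path_iter in Source B): pending frames of remaining
-- children, current path, visited set; dfl is a depth-budget fuel guard (sufficient on all
-- inputs: the dfs depth never exceeds the number of distinct nodes + 1)
def pvMach (cgd : PySem.Dict String (List String)) (target : String) :
    Nat → List (List String) → List String → PySem.Set String → List String
  | _, [], _, _ => []
  | dfl, [] :: rest, path, vis => pvMach cgd target (dfl+1) rest path.dropLast vis
  | dfl, (node :: sib) :: rest, path, vis =>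
    if PySem.Set.contains vis node then
      pvMach cgd target dfl (sib :: rest) path vis
    else match dfl with
      | 0 => pvMach cgd target 0 (sib :: rest) path vis
      | d+1 =>
        let p' := path ++ [node]
        if node == target then p'
        else pvMach cgd target d ((cgd.getD node []) :: sib :: rest) p'
               (PySem.Set.add vis node)
termination_by dfl st _ _ => pvPhi (pvDSize cgd + 2) dfl st
decreasing_by
  · exact pvPhi_pop _ _ _ (by omega)
  · exact pvPhi_skip _ _ _ _ _ (by omega)
  · exact pvPhi_skip _ _ _ _ _ (by omega)
  · have hch : (cgd.getD node []).length + 1 < pvDSize cgd + 2 := by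
      have := pvGetD_len_le cgd node
      omega
    exact pvPhi_visit _ _ _ _ _ _ hch

-- B: hoisted per-caller index — each callee's maximal call line
def pvBuildMaxB (infos : List (String × Int)) : PySem.Dict String Int :=
  infos.foldl (fun d ci =>
    if d.contains ci.1 = false then d.insert ci.1 ci.2
    else if d.getD ci.1 0 < ci.2 then d.insert ci.1 ci.2
    else d) PySem.Dict.empty

-- B: direct dependencies of one target read off the hoisted index (raw list, duplicates kept;
-- the closure below dedups its own seed)
def pvDepsRawB (idx : List (List (String × Int) × PySem.Dict String Int)) (t : String) :
    List String :=
  idx.flatMap (fun q =>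
    match q.2.get? t with
    | none => []
    | some m => (q.1.filter (fun ci => decide (ci.2 < m) && (ci.1 != t))).map (fun ci => ci.1))

-- B: push a list of candidates into the (order list, seen set) accumulator
def pvPush : List String → List String × PySem.Set String → List String × PySem.Set String
  | [], p => p
  | c :: cs, p =>
    pvPush cs (if PySem.Set.contains p.2 c then p else (p.1 ++ [c], PySem.Set.add p.2 c))

-- B: pointer-based worklist closure (_closure in Source B)
def pvBfs (neigh : String → List String) :
    Nat → List String → PySem.Set String → Nat → List String
  | 0, order, _, _ => order
  | fuel+1, order, seen, i =>
    if h : i < order.length then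
      let st := pvPush (neigh order[i]) (order, seen)
      pvBfs neigh fuel st.1 st.2 (i+1)
    else order

def compute_instrumentation_set_alt (call_graph : List (String × List String)) (call_sites : List (String × List (String × Int))) (bb_calls : List (String × List (List String))) (entry_func : String) (target_funcs : List String) : List String :=
  let cgd := PySem.Dict.mk call_graph
  let bbd := PySem.Dict.mk bb_calls
  let idx := call_sites.map (fun p => (p.2, pvBuildMaxB p.2))
  (target_funcs.foldl (fun acc t =>
    let fp := pvMach cgd t (pvCgSize call_graph + 2) [[entry_func]] [] PySem.Set.empty
    let dinit := pvPush (pvDepsRawB idx t) ([], PySem.Set.empty)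
    let rd := pvBfs (fun f => cgd.getD f []) (dinit.1.length + pvCgSize call_graph + 1)
                dinit.1 dinit.2 0
    let finit := pvPush rd ([], PySem.Set.empty)
    let full := pvBfs (fun f => (bbd.getD f []).flatten) (finit.1.length + pvBbSize bb_calls + 1)
                 finit.1 finit.2 0
    pvPush (fp ++ full) acc)
    (([], PySem.Set.empty) : List String × PySem.Set String)).1

-- ===== PRECONDITION & SPEC =====
def Spec_compute_instrumentation_set (call_graph : List (String × List String)) (call_sites : List (String × List (String × Int))) (bb_calls : List (String × List (List String))) (entry_func : String) (target_funcs : List String) (out : List String) : Prop := out = compute_instrumentation_set_alt call_graph call_sites bb_calls entry_func target_funcs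
instance (call_graph : List (String × List String)) (call_sites : List (String × List (String × Int))) (bb_calls : List (String × List (List String))) (entry_func : String) (target_funcs : List String) (out : List String) : Decidable (Spec_compute_instrumentation_set call_graph call_sites bb_calls entry_func target_funcs out) := by unfold Spec_compute_instrumentation_set; infer_instance

-- ===== CLAIM (what is proved, stated in full; the proofs are below) =====
def Claim_equal_compute_instrumentation_set : Prop := ∀ (call_graph : List (String × List String)) (call_sites : List (String × List (String × Int))) (bb_calls : List (String × List (List String))) (entry_func : String) (target_funcs : List String), Dom_compute_instrumentation_set call_graph call_sites bb_calls entry_func target_funcs → Spec_compute_instrumentation_set call_graph call_sites bb_calls entry_func target_funcs (compute_instrumentation_set call_graph call_sites bb_calls entry_func target_funcs)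

-- ===== LEMMAS AND PROOFS =====

-- membership is preserved by folding Set.add
theorem pvMem_foldl_add (l : List String) :
    ∀ (s : PySem.Set String) (x : String), (x ∈ s ∨ x ∈ l) →
      x ∈ l.foldl PySem.Set.add s := by
  induction l with
  | nil => intro s x h; simpa using h
  | cons c rest ih =>
    intro s x h
    apply ih
    rcases h with h | h
    · exact Or.inl ((PySem.Set.mem_add s c x).2 (Or.inl h))
    · rcases List.mem_cons.1 h with h | h
      · exact Or.inl ((PySem.Set.mem_add s c x).2 (Or.inr h))
      · exact Or.inr h

-- folding a list already contained in s is the identity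
theorem pvFoldl_add_absorb (l : List String) :
    ∀ (s : PySem.Set String), (∀ x ∈ l, x ∈ s) → l.foldl PySem.Set.add s = s := by
  induction l with
  | nil => intro s _; rfl
  | cons c rest ih =>
    intro s h
    have hc : PySem.Set.add s c = s := PySem.Set.add_of_mem (h c (by simp))
    simp only [List.foldl_cons, hc]
    exact ih s (fun x hx => h x (by simp [hx]))

-- folding over (add a c) is add of the fold over a
theorem pvFoldl_add_add (a : List String) (s : PySem.Set String) (c : String) :
    (PySem.Set.add a c).foldl PySem.Set.add s
      = PySem.Set.add (a.foldl PySem.Set.add s) c := by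
  by_cases hc : c ∈ a
  · rw [PySem.Set.add_of_mem hc]
    rw [PySem.Set.add_of_mem (pvMem_foldl_add a s c (Or.inr hc))]
  · have : PySem.Set.add a c = a ++ [c] := by
      simp only [PySem.Set.add, PySem.Set.contains]
      rw [if_neg]
      simp [hc]
    rw [this, List.foldl_append]
    rfl

-- re-associating nested Set.add folds
theorem pvFoldl_add_assoc (l : List String) :
    ∀ (a s : PySem.Set String),
      (l.foldl PySem.Set.add a).foldl PySem.Set.add s
        = l.foldl PySem.Set.add (a.foldl PySem.Set.add s) := by
  induction l with
  | nil => intro a s; rfl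
  | cons c rest ih =>
    intro a s
    simp only [List.foldl_cons]
    rw [ih (PySem.Set.add a c) s, pvFoldl_add_add]

-- ---- path search: A's recursive dfs agrees with B's explicit-stack machine ----

theorem pvDfsA_false_path (cgd : PySem.Dict String (List String)) (target : String) :
    ∀ (df : Nat) (vis : PySem.Set String) (node : String) (cp : List String),
      (pvDfsA cgd target df vis node cp).1 = false →
      (pvDfsA cgd target df vis node cp).2.2.2 = [] := by
  intro df vis node cp
  cases df with
  | zero => intro _; simp [pvDfsA]
  | succ f =>
    simp only [pvDfsA]
    by_cases hv : PySem.Set.contains vis node = true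
    · rw [if_pos hv]
      intro _
      rfl
    · rw [if_neg hv]
      by_cases ht : (node == target) = true
      · rw [if_pos ht]
        intro h
        simp at h
      · rw [if_neg ht]
        rcases pvDfsLoopA cgd target f (PySem.Set.add vis node) (cgd.getD node [])
            (cp ++ [node]) with ⟨b, v, c, p⟩
        cases b <;> simp

theorem pvMach_agree (cgd : PySem.Dict String (List String)) (target : String) :
    ∀ df : Nat,
      (∀ (vis : PySem.Set String) (node : String) (cp sib : List String)
          (rest : List (List String)),
        pvMach cgd target df ((node :: sib) :: rest) cp vis
        = if (pvDfsA cgd target df vis node cp).1 then (pvDfsA cgd target df vis node cp).2.2.2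
          else pvMach cgd target df (sib :: rest) (pvDfsA cgd target df vis node cp).2.2.1
                 (pvDfsA cgd target df vis node cp).2.1)
      ∧ (∀ (vis : PySem.Set String) (cs cp : List String) (rest : List (List String)),
        pvMach cgd target df (cs :: rest) cp vis
        = if (pvDfsLoopA cgd target df vis cs cp).1 then
            (pvDfsLoopA cgd target df vis cs cp).2.2.2
          else pvMach cgd target (df+1) rest
                 ((pvDfsLoopA cgd target df vis cs cp).2.2.1).dropLast
                 (pvDfsLoopA cgd target df vis cs cp).2.1) := by
  intro df
  induction df with
  | zero =>
    have hd : ∀ (vis : PySem.Set String) (node : String) (cp sib : List String)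
        (rest : List (List String)),
        pvMach cgd target 0 ((node :: sib) :: rest) cp vis
        = if (pvDfsA cgd target 0 vis node cp).1 then (pvDfsA cgd target 0 vis node cp).2.2.2
          else pvMach cgd target 0 (sib :: rest) (pvDfsA cgd target 0 vis node cp).2.2.1
                 (pvDfsA cgd target 0 vis node cp).2.1 := by
      intro vis node cp sib rest
      simp only [pvDfsA, pvMach]
      by_cases hv : PySem.Set.contains vis node = true
      · rw [if_pos hv]; simp
      · rw [if_neg hv]; simp
    refine ⟨hd, ?_⟩
    intro vis cs cp rest
    induction cs generalizing vis cp with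
    | nil => simp [pvDfsLoopA, pvMach]
    | cons c cs ih =>
      simp only [pvDfsLoopA]
      rw [hd vis c cp cs rest]
      simp only [pvDfsA]
      simpa using ih vis cp
  | succ f ihf =>
    have hd : ∀ (vis : PySem.Set String) (node : String) (cp sib : List String)
        (rest : List (List String)),
        pvMach cgd target (f+1) ((node :: sib) :: rest) cp vis
        = if (pvDfsA cgd target (f+1) vis node cp).1 then
            (pvDfsA cgd target (f+1) vis node cp).2.2.2
          else pvMach cgd target (f+1) (sib :: rest) (pvDfsA cgd target (f+1) vis node cp).2.2.1
                 (pvDfsA cgd target (f+1) vis node cp).2.1 := by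
      intro vis node cp sib rest
      simp only [pvMach, pvDfsA]
      by_cases hv : PySem.Set.contains vis node = true
      · simp only [if_pos hv]
        simp
      · simp only [if_neg hv]
        by_cases ht : (node == target) = true
        · simp only [if_pos ht]
          simp
        · simp only [if_neg ht]
          rw [ihf.2 (PySem.Set.add vis node) (cgd.getD node []) (cp ++ [node]) (sib :: rest)]
          rcases hL : pvDfsLoopA cgd target f (PySem.Set.add vis node) (cgd.getD node [])
              (cp ++ [node]) with ⟨b, v, c, p⟩
          cases b <;> simp
    refine ⟨hd, ?_⟩
    intro vis cs cp rest
    induction cs generalizing vis cp with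
    | nil => simp [pvDfsLoopA, pvMach]
    | cons c cs ih =>
      simp only [pvDfsLoopA]
      rw [hd vis c cp cs rest]
      rcases hA : pvDfsA cgd target (f+1) vis c cp with ⟨b, v, c2, p⟩
      cases b
      · simpa using ih v c2
      · simp

-- B's machine started on the single frame [entry] computes A's dfs path
theorem pvMach_path (cgd : PySem.Dict String (List String)) (target : String) (F : Nat)
    (e : String) :
    pvMach cgd target F [[e]] [] PySem.Set.empty
      = (pvDfsA cgd target F PySem.Set.empty e []).2.2.2 := by
  have h := (pvMach_agree cgd target F).1 PySem.Set.empty e [] [] []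
  rw [h]
  rcases hA : pvDfsA cgd target F PySem.Set.empty e [] with ⟨b, v, c, p⟩
  cases b
  · have hp := pvDfsA_false_path cgd target F PySem.Set.empty e []
    rw [hA] at hp
    simp only [pvMach]
    simpa using (hp rfl).symm
  · simp

-- ---- direct dependencies: A's any(line < tgt_line) scan agrees with B's max index ----

def pvOMax (o : Option Int) (v : Int) : Int :=
  match o with
  | none => v
  | some m => max m v

theorem pvBuildMaxB_get?_aux (t : String) (infos : List (String × Int)) :
    ∀ d : PySem.Dict String Int,
      (infos.foldl (fun d ci =>
        if d.contains ci.1 = false then d.insert ci.1 ci.2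
        else if d.getD ci.1 0 < ci.2 then d.insert ci.1 ci.2
        else d) d).get? t =
      infos.foldl (fun o ci => if ci.1 == t then some (pvOMax o ci.2) else o) (d.get? t) := by
  induction infos with
  | nil => intro d; rfl
  | cons ci rest ih =>
    intro d
    simp only [List.foldl_cons]
    rw [ih]
    congr 1
    rcases hg : d.get? ci.1 with _ | m
    · have hc : d.contains ci.1 = false := by
        rw [PySem.Dict.contains_eq_isSome_get?, hg]; rfl
      rw [if_pos hc, PySem.Dict.get?_insert]
      by_cases hct : ci.1 = t
      · subst hct; simp [hg, pvOMax]
      · simp [hct, Ne.symm hct]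
    · have hc : d.contains ci.1 = true := by
        rw [PySem.Dict.contains_eq_isSome_get?, hg]; rfl
      have hgd : d.getD ci.1 0 = m := by
        rw [PySem.Dict.getD_eq_get?_getD, hg]; rfl
      rw [if_neg (by simp [hc]), hgd]
      by_cases hlt : m < ci.2
      · rw [if_pos hlt, PySem.Dict.get?_insert]
        by_cases hct : ci.1 = t
        · subst hct; simp [hg, pvOMax, max_eq_right (le_of_lt hlt)]
        · simp [hct, Ne.symm hct]
      · rw [if_neg hlt]
        by_cases hct : ci.1 = t
        · subst hct; simp [hg, pvOMax, max_eq_left (not_lt.mp hlt)]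
        · simp [hct]

theorem pvBuildMaxB_get? (infos : List (String × Int)) (t : String) :
    (pvBuildMaxB infos).get? t =
      infos.foldl (fun o ci => if ci.1 == t then some (pvOMax o ci.2) else o) none := by
  have := pvBuildMaxB_get?_aux t infos PySem.Dict.empty
  simpa [pvBuildMaxB, PySem.Dict.get?_empty] using this

theorem pvFoldl_filter {γ : Type} (t : String) (f : γ → Int → γ) (l : List (String × Int)) :
    ∀ o : γ, l.foldl (fun o ci => if ci.1 == t then f o ci.2 else o) o
      = ((l.filter (fun ci => ci.1 == t)).map (fun ci => ci.2)).foldl f o := by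
  induction l with
  | nil => intro o; rfl
  | cons ci rest ih =>
    intro o
    by_cases h : ci.1 == t
    · simp only [List.foldl_cons, List.filter_cons, h]
      rw [ih]; rfl
    · simp only [List.foldl_cons, List.filter_cons, h]
      simp only [Bool.false_eq_true, if_false]
      rw [ih]

theorem pvFoldl_some_max (r : List Int) :
    ∀ a : Int, r.foldl (fun o l => some (pvOMax o l)) (some a) = some (r.foldl max a) := by
  induction r with
  | nil => intro a; rfl
  | cons l rest ih => intro a; simp only [List.foldl_cons]; rw [ih]; rfl

theorem pvAny_lt_max (tls : List Int) (m x : Int) (hm : m ∈ tls) (hb : ∀ l ∈ tls, l ≤ m) :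
    tls.any (fun tl => decide (x < tl)) = decide (x < m) := by
  by_cases h : x < m
  · simp only [decide_eq_true h, List.any_eq_true]
    exact ⟨m, hm, by simpa using h⟩
  · simp only [decide_eq_false h, List.any_eq_false]
    intro l hl
    simp only [decide_eq_true_eq]
    intro hxl
    exact h (lt_of_lt_of_le hxl (hb l hl))

theorem pvFoldl_flatMap {γ : Type} (h : γ → List String) (l : List γ) :
    ∀ dep : PySem.Set String,
      (l.flatMap h).foldl PySem.Set.add dep
        = l.foldl (fun dep q => (h q).foldl PySem.Set.add dep) dep := by
  induction l with
  | nil => intro dep; rfl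
  | cons q rest ih =>
    intro dep
    simp only [List.flatMap_cons, List.foldl_append, List.foldl_cons]
    exact ih _

theorem pvFoldl_filter_map_add (c : String × Int → Bool) (l : List (String × Int)) :
    ∀ dep : PySem.Set String,
      ((l.filter c).map (fun ci => ci.1)).foldl PySem.Set.add dep
        = l.foldl (fun dep ci => if c ci then PySem.Set.add dep ci.1 else dep) dep := by
  induction l with
  | nil => intro dep; rfl
  | cons ci rest ih =>
    intro dep
    by_cases h : c ci <;> simp only [List.filter_cons, h, List.foldl_cons, if_true, if_false,
      Bool.false_eq_true, List.map_cons] <;> exact ih _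

-- B's hoisted-index dependency list, deduplicated, is A's dependency set
theorem pvDeps_agree (cs : List (String × List (String × Int))) (t : String) :
    List.foldl PySem.Set.add PySem.Set.empty
        (pvDepsRawB (cs.map (fun p => (p.2, pvBuildMaxB p.2))) t)
      = pvDepsA cs t := by
  unfold pvDepsA pvDepsRawB
  rw [pvFoldl_flatMap, List.foldl_map]
  congr 1
  funext dep p
  simp only
  rw [pvBuildMaxB_get?, pvFoldl_filter t (fun o v => some (pvOMax o v)) p.2]
  rcases htls : (p.2.filter (fun ci => ci.1 == t)).map (fun ci => ci.2) with _ | ⟨hh, r⟩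
  · simp [htls]
  · simp only [htls, List.foldl_cons]
    have h1 : pvOMax none hh = hh := rfl
    rw [h1, pvFoldl_some_max]
    rw [if_neg (by simp)]
    have hm : List.foldl max hh r ∈ hh :: r := by
      rcases PySem.List.foldl_max_mem r hh with heq | hmem
      · rw [heq]; exact List.mem_cons_self
      · exact List.mem_cons_of_mem hh hmem
    have hb : ∀ l ∈ hh :: r, l ≤ List.foldl max hh r := by
      intro l hl
      rcases List.mem_cons.1 hl with hl | hl
      · rw [hl]; exact (PySem.List.le_foldl_max r hh).1
      · exact (PySem.List.le_foldl_max r hh).2 l hl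
    rw [pvFoldl_filter_map_add]
    congr 1
    funext dep ci
    rw [pvAny_lt_max (hh :: r) (List.foldl max hh r) ci.2 hm hb]

-- ---- closures: A's deque BFS agrees with B's pointer worklist ----

theorem pvPush_eq_foldl : ∀ (l : List String) (p : List String × PySem.Set String),
    pvPush l p = l.foldl (fun p c =>
      if PySem.Set.contains p.2 c then p else (p.1 ++ [c], PySem.Set.add p.2 c)) p := by
  intro l
  induction l with
  | nil => intro p; rfl
  | cons c rest ih => intro p; simp only [pvPush, List.foldl_cons]; exact ih _

def pvClosureGen (neigh : String → List String) :
    Nat → PySem.Set String → List String → PySem.Set String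
  | 0, all, _ => all
  | _+1, all, [] => all
  | fuel+1, all, func :: qs =>
    let st := (neigh func).foldl
      (fun (p : PySem.Set String × List String) c =>
        if PySem.Set.contains p.1 c then p else (PySem.Set.add p.1 c, p.2 ++ [c]))
      (all, qs)
    pvClosureGen neigh fuel st.1 st.2

theorem pvRecDepsA_eq_gen (cgd : PySem.Dict String (List String)) :
    ∀ fuel all q, pvRecDepsA cgd fuel all q = pvClosureGen (fun f => cgd.getD f []) fuel all q := by
  intro fuel
  induction fuel with
  | zero => intro all q; rfl
  | succ f ih =>
    intro all q
    cases q with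
    | nil => rfl
    | cons func qs =>
      simp only [pvRecDepsA, pvClosureGen]
      apply ih

theorem pvExpandA_eq_gen (bbd : PySem.Dict String (List (List String))) :
    ∀ fuel all q, pvExpandA bbd fuel all q =
      pvClosureGen (fun f => (bbd.getD f []).flatten) fuel all q := by
  intro fuel
  induction fuel with
  | zero => intro all q; rfl
  | succ f ih =>
    intro all q
    cases q with
    | nil => rfl
    | cons func qs =>
      simp only [pvExpandA, pvClosureGen]
      rw [List.foldl_flatten]
      apply ih

theorem pvStepFold (ns : List String) :
    ∀ (s : PySem.Set String) (k : Nat), k ≤ s.length →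
      (ns.foldl (fun (p : PySem.Set String × List String) c =>
          if PySem.Set.contains p.1 c then p else (PySem.Set.add p.1 c, p.2 ++ [c]))
        (s, s.drop k)).1
      = (ns.foldl (fun (p : List String × PySem.Set String) c =>
          if PySem.Set.contains p.2 c then p else (p.1 ++ [c], PySem.Set.add p.2 c))
        (s, s)).1 ∧
      (ns.foldl (fun (p : PySem.Set String × List String) c =>
          if PySem.Set.contains p.1 c then p else (PySem.Set.add p.1 c, p.2 ++ [c]))
        (s, s.drop k)).2
      = ((ns.foldl (fun (p : List String × PySem.Set String) c =>
          if PySem.Set.contains p.2 c then p else (p.1 ++ [c], PySem.Set.add p.2 c))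
        (s, s)).1).drop k ∧
      (ns.foldl (fun (p : List String × PySem.Set String) c =>
          if PySem.Set.contains p.2 c then p else (p.1 ++ [c], PySem.Set.add p.2 c))
        (s, s)).2
      = (ns.foldl (fun (p : List String × PySem.Set String) c =>
          if PySem.Set.contains p.2 c then p else (p.1 ++ [c], PySem.Set.add p.2 c))
        (s, s)).1 ∧
      k ≤ ((ns.foldl (fun (p : List String × PySem.Set String) c =>
          if PySem.Set.contains p.2 c then p else (p.1 ++ [c], PySem.Set.add p.2 c))
        (s, s)).1).length := by
  induction ns with
  | nil => intro s k hk; exact ⟨rfl, rfl, rfl, hk⟩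
  | cons c rest ih =>
    intro s k hk
    simp only [List.foldl_cons]
    by_cases hc : PySem.Set.contains s c
    · simp only [hc]
      exact ih s k hk
    · simp only [hc, Bool.false_eq_true, if_false]
      have hadd : PySem.Set.add s c = s ++ [c] := by
        simp only [PySem.Set.add, hc, Bool.false_eq_true, if_false]
      have hdrop : (s.drop k) ++ [c] = (s ++ [c]).drop k := by
        rw [List.drop_append_of_le_length hk]
      rw [hadd, hdrop]
      have := ih (s ++ [c]) k (by simp; omega)
      simpa [hadd] using this

theorem pvGen_eq_bfs (neigh : String → List String) :
    ∀ (fuel : Nat) (order : List String) (i : Nat), i ≤ order.length →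
      pvClosureGen neigh fuel order (order.drop i) = pvBfs neigh fuel order order i := by
  intro fuel
  induction fuel with
  | zero => intro order i _; rfl
  | succ f ih =>
    intro order i hi
    by_cases h : i < order.length
    · rw [← List.getElem_cons_drop h]
      simp only [pvClosureGen, pvBfs, dif_pos h]
      rw [pvPush_eq_foldl]
      obtain ⟨h1, h2, h3, h4⟩ := pvStepFold (neigh order[i]) order (i+1) (by omega)
      rw [h1, h2, h3]
      exact ih _ (i+1) h4
    · have hd : order.drop i = [] := List.drop_eq_nil_of_le (by omega)
      rw [hd]
      simp only [pvClosureGen, pvBfs, dif_neg h]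

theorem pvBfs_fold_prefix (ns : List String) :
    ∀ (p : List String × PySem.Set String), ∃ news,
      (ns.foldl (fun (p : List String × PySem.Set String) c =>
        if PySem.Set.contains p.2 c then p else (p.1 ++ [c], PySem.Set.add p.2 c)) p).1
      = p.1 ++ news := by
  induction ns with
  | nil => intro p; exact ⟨[], by simp⟩
  | cons c rest ih =>
    intro p
    simp only [List.foldl_cons]
    by_cases hc : PySem.Set.contains p.2 c
    · simp only [hc]; exact ih p
    · simp only [hc, Bool.false_eq_true, if_false]
      obtain ⟨news, hn⟩ := ih (p.1 ++ [c], PySem.Set.add p.2 c)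
      exact ⟨[c] ++ news, by rw [hn]; simp⟩

theorem pvBfs_prefix (neigh : String → List String) :
    ∀ (fuel : Nat) (order : List String) (seen : PySem.Set String) (i : Nat),
      ∃ r, pvBfs neigh fuel order seen i = order ++ r := by
  intro fuel
  induction fuel with
  | zero => intro order seen i; exact ⟨[], by simp [pvBfs]⟩
  | succ f ih =>
    intro order seen i
    by_cases h : i < order.length
    · simp only [pvBfs, dif_pos h]
      rw [pvPush_eq_foldl]
      obtain ⟨news, hn⟩ := pvBfs_fold_prefix (neigh order[i]) (order, seen)
      obtain ⟨r, hr⟩ := ih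
        ((neigh order[i]).foldl (fun p c =>
          if PySem.Set.contains p.2 c then p else (p.1 ++ [c], PySem.Set.add p.2 c)) (order, seen)).1
        ((neigh order[i]).foldl (fun p c =>
          if PySem.Set.contains p.2 c then p else (p.1 ++ [c], PySem.Set.add p.2 c)) (order, seen)).2
        (i+1)
      rw [hr, hn]
      exact ⟨news ++ r, by simp⟩
    · simp only [pvBfs, dif_neg h]
      exact ⟨[], by simp⟩

theorem pvClosureGen_nodup (neigh : String → List String) :
    ∀ (fuel : Nat) (all : PySem.Set String) (q : List String), all.Nodup →
      (pvClosureGen neigh fuel all q).Nodup := by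
  intro fuel
  induction fuel with
  | zero => intro all q h; exact h
  | succ f ih =>
    intro all q h
    cases q with
    | nil => exact h
    | cons func qs =>
      simp only [pvClosureGen]
      apply ih
      have : ∀ (ns : List String) (p : PySem.Set String × List String), p.1.Nodup →
          ((ns.foldl (fun (p : PySem.Set String × List String) c =>
            if PySem.Set.contains p.1 c then p
            else (PySem.Set.add p.1 c, p.2 ++ [c])) p).1).Nodup := by
        intro ns
        induction ns with
        | nil => intro p hp; exact hp
        | cons c rest ihn =>
          intro p hp
          simp only [List.foldl_cons]
          split
          · exact ihn p hp
          · exact ihn _ (PySem.Set.nodup_add p.1 c hp)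
      exact this _ (all, qs) h

-- ---- the ordered emit accumulator ----

theorem pvFoldl_add_empty (l : List String) :
    List.foldl PySem.Set.add PySem.Set.empty l = PySem.Set.ofList l :=
  (PySem.Set.ofList_eq_foldl l).symm

theorem pvPush_pair (l : List String) :
    ∀ s : PySem.Set String,
      pvPush l (s, s) = (l.foldl PySem.Set.add s, l.foldl PySem.Set.add s) := by
  induction l with
  | nil => intro s; rfl
  | cons c rest ih =>
    intro s
    simp only [pvPush, List.foldl_cons]
    have hstep : (if PySem.Set.contains s c then ((s : List String), s)
        else (s ++ [c], PySem.Set.add s c)) = (PySem.Set.add s c, PySem.Set.add s c) := by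
      by_cases hc : c ∈ s
      · simp [hc]
      · simp [hc]
    rw [hstep, ih]

-- diagonal fold: a pair fold whose step keeps both components equal
theorem pvFoldl_diag {β : Type}
    (stepB : List String × PySem.Set String → β → List String × PySem.Set String)
    (stepA : PySem.Set String → β → PySem.Set String)
    (h : ∀ (s : PySem.Set String) (t : β), stepB (s, s) t = (stepA s t, stepA s t)) :
    ∀ (l : List β) (s : PySem.Set String),
      l.foldl stepB (s, s) = (l.foldl stepA s, l.foldl stepA s) := by
  intro l
  induction l with
  | nil => intro s; rfl
  | cons t rest ih =>
    intro s
    simp only [List.foldl_cons]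
    rw [h s t]
    exact ih _

-- ---- the per-target step of B agrees with the per-target step of A ----

theorem pvStep_agree (cg : List (String × List String)) (cs : List (String × List (String × Int)))
    (bb : List (String × List (List String))) (e t : String) (s : PySem.Set String) :
    (let cgd := PySem.Dict.mk cg
     let bbd := PySem.Dict.mk bb
     let idx := cs.map (fun p => (p.2, pvBuildMaxB p.2))
     let fp := pvMach cgd t (pvCgSize cg + 2) [[e]] [] PySem.Set.empty
     let dinit := pvPush (pvDepsRawB idx t) ([], PySem.Set.empty)
     let rd := pvBfs (fun f => cgd.getD f []) (dinit.1.length + pvCgSize cg + 1)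
                 dinit.1 dinit.2 0
     let finit := pvPush rd ([], PySem.Set.empty)
     let full := pvBfs (fun f => (bbd.getD f []).flatten) (finit.1.length + pvBbSize bb + 1)
                  finit.1 finit.2 0
     pvPush (fp ++ full) (s, s))
    = (let cgd := PySem.Dict.mk cg
       let bbd := PySem.Dict.mk bb
       let fp := (pvDfsA cgd t (pvCgSize cg + 2) PySem.Set.empty e []).2.2.2
       let dd := pvDepsA cs t
       let rd := pvRecDepsA cgd (dd.length + pvCgSize cg + 1) (PySem.Set.ofList dd) dd
       let bbx := pvExpandA bbd (rd.length + pvBbSize bb + 1) (PySem.Set.ofList rd) rd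
       (PySem.Set.update s (PySem.Set.union (PySem.Set.union (PySem.Set.ofList fp) rd) bbx),
        PySem.Set.update s (PySem.Set.union (PySem.Set.union (PySem.Set.ofList fp) rd) bbx))) := by
  simp only []
  rw [pvMach_path]
  rw [show (([], PySem.Set.empty) : List String × PySem.Set String)
        = ((PySem.Set.empty : PySem.Set String), (PySem.Set.empty : PySem.Set String)) from rfl]
  rw [pvPush_pair (pvDepsRawB (cs.map (fun p => (p.2, pvBuildMaxB p.2))) t) PySem.Set.empty]
  rw [pvDeps_agree cs t]
  have hnd : (pvDepsA cs t).Nodup := by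
    rw [← pvDeps_agree cs t, pvFoldl_add_empty]
    exact PySem.Set.nodup_ofList _
  set dd := pvDepsA cs t with hdd
  dsimp only
  rw [PySem.Set.ofList_eq_self_of_nodup dd hnd]
  rw [pvRecDepsA_eq_gen (PySem.Dict.mk cg)]
  have hgen1 := pvGen_eq_bfs (fun f => (PySem.Dict.mk cg).getD f [])
    (dd.length + pvCgSize cg + 1) dd 0 (Nat.zero_le _)
  rw [List.drop_zero] at hgen1
  rw [hgen1]
  set rd := pvBfs (fun f => (PySem.Dict.mk cg).getD f [])
    (dd.length + pvCgSize cg + 1) dd dd 0 with hrd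
  have hrdnd : rd.Nodup := by
    have h := pvClosureGen_nodup (fun f => (PySem.Dict.mk cg).getD f [])
      (dd.length + pvCgSize cg + 1) dd dd hnd
    rw [hgen1] at h
    exact h
  rw [pvPush_pair rd PySem.Set.empty, pvFoldl_add_empty rd,
    PySem.Set.ofList_eq_self_of_nodup rd hrdnd]
  dsimp only
  rw [pvExpandA_eq_gen (PySem.Dict.mk bb)]
  have hgen2 := pvGen_eq_bfs (fun f => ((PySem.Dict.mk bb).getD f []).flatten)
    (rd.length + pvBbSize bb + 1) rd 0 (Nat.zero_le _)
  rw [List.drop_zero] at hgen2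
  rw [hgen2]
  set full := pvBfs (fun f => ((PySem.Dict.mk bb).getD f []).flatten)
    (rd.length + pvBbSize bb + 1) rd rd 0 with hfull
  obtain ⟨tail2, hpre⟩ := pvBfs_prefix (fun f => ((PySem.Dict.mk bb).getD f []).flatten)
    (rd.length + pvBbSize bb + 1) rd rd 0
  rw [← hfull] at hpre
  set fp := (pvDfsA (PySem.Dict.mk cg) t (pvCgSize cg + 2) PySem.Set.empty e []).2.2.2 with hfp
  rw [pvPush_pair (fp ++ full) s, List.foldl_append]
  simp only [PySem.Set.union, PySem.Set.update, PySem.Set.ofList]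
  rw [pvFoldl_add_assoc full, pvFoldl_add_assoc rd, pvFoldl_add_assoc fp]
  simp only [PySem.Set.empty, List.foldl_nil]
  have habs : List.foldl PySem.Set.add
        (List.foldl PySem.Set.add (List.foldl PySem.Set.add s fp) rd) rd
      = List.foldl PySem.Set.add (List.foldl PySem.Set.add s fp) rd :=
    pvFoldl_add_absorb rd _
      (fun x hx => pvMem_foldl_add rd (List.foldl PySem.Set.add s fp) x (Or.inr hx))
  have hcomp : List.foldl PySem.Set.add (List.foldl PySem.Set.add s fp) full
      = List.foldl PySem.Set.add
          (List.foldl PySem.Set.add (List.foldl PySem.Set.add s fp) rd) full := by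
    rw [hpre, List.foldl_append, List.foldl_append, habs]
  rw [Prod.mk.injEq]
  exact ⟨hcomp, hcomp⟩

theorem compute_instrumentation_set_spec : Claim_equal_compute_instrumentation_set := by
  intro cg cs bb e ts _
  unfold Spec_compute_instrumentation_set compute_instrumentation_set compute_instrumentation_set_alt
  have h2 := pvFoldl_diag
    (fun acc t =>
      let cgd := PySem.Dict.mk cg
      let bbd := PySem.Dict.mk bb
      let idx := cs.map (fun p => (p.2, pvBuildMaxB p.2))
      let fp := pvMach cgd t (pvCgSize cg + 2) [[e]] [] PySem.Set.empty
      let dinit := pvPush (pvDepsRawB idx t) ([], PySem.Set.empty)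
      let rd := pvBfs (fun f => cgd.getD f []) (dinit.1.length + pvCgSize cg + 1)
                  dinit.1 dinit.2 0
      let finit := pvPush rd ([], PySem.Set.empty)
      let full := pvBfs (fun f => (bbd.getD f []).flatten) (finit.1.length + pvBbSize bb + 1)
                   finit.1 finit.2 0
      pvPush (fp ++ full) acc)
    (fun inst t =>
      let cgd := PySem.Dict.mk cg
      let bbd := PySem.Dict.mk bb
      let fp := (pvDfsA cgd t (pvCgSize cg + 2) PySem.Set.empty e []).2.2.2
      let dd := pvDepsA cs t
      let rd := pvRecDepsA cgd (dd.length + pvCgSize cg + 1) (PySem.Set.ofList dd) dd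
      let bbx := pvExpandA bbd (rd.length + pvBbSize bb + 1) (PySem.Set.ofList rd) rd
      PySem.Set.update inst (PySem.Set.union (PySem.Set.union (PySem.Set.ofList fp) rd) bbx))
    (fun s t => pvStep_agree cg cs bb e t s) ts PySem.Set.empty
  exact (congrArg Prod.fst h2).symm
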